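-- pv_equiv track=rewrite | github.com/JB-SelfCompany/FFmpeg-UI-2.0 | app/core/gpu_detector.py | _parse_decoders
-- ===== SOURCE A (Python) =====
-- from typing import Dict, List, Optional, Tuple, Set
--
-- def _parse_decoders(output: str) -> List[str]:
--     """Парсинг декодеров"""
--     decoders = []
--     for line in output.split('\n'):
--         line = line.strip()
--         if line and line.startswith('V'):
--             parts = line.split()
--             if len(parts) >= 2:
--                 decoders.append(parts[1])
--     return decoders
-- ===== SOURCE B (Python) =====
-- def _parse_decoders(output: str) -> list[str]:
--     # Single character-level finite-state machine over the raw string: no split(),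
--     # no per-line strip(); states track position within the current line.
--     # 0 = at line start / skipping leading whitespace
--     # 1 = inside a first token that began with 'V'
--     # 2 = in the gap after that first token
--     # 3 = inside the second token (being collected)
--     # 4 = ignoring the rest of the line
--     decoders = []
--     state = 0
--     buf = []
--     for c in output:
--         if c == '\n':
--             if state == 3:
--                 decoders.append(''.join(buf))
--             state = 0
--             buf = []
--         elif state == 0:
--             if c.isspace():
--                 pass
--             elif c == 'V':
--                 state = 1
--             else:
--                 state = 4
--         elif state == 1:
--             if c.isspace():
--                 state = 2
--         elif state == 2:
--             if not c.isspace():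
--                 state = 3
--                 buf = [c]
--         elif state == 3:
--             if c.isspace():
--                 decoders.append(''.join(buf))
--                 buf = []
--                 state = 4
--             else:
--                 buf.append(c)
--     if state == 3:
--         decoders.append(''.join(buf))
--     return decoders
-- ===== Notes on version B (the rewrite author's own statement) =====
-- stated objective: alternative
-- what changed: B replaces A's split-into-lines + strip + str.split() tokenization with a single character-level finite-state machine over the raw string (states: line start, first token begun with 'V', gap, collecting second token, ignoring rest of line), emitting the collected second token at the separating whitespace or newline.
import Mathlib
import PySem

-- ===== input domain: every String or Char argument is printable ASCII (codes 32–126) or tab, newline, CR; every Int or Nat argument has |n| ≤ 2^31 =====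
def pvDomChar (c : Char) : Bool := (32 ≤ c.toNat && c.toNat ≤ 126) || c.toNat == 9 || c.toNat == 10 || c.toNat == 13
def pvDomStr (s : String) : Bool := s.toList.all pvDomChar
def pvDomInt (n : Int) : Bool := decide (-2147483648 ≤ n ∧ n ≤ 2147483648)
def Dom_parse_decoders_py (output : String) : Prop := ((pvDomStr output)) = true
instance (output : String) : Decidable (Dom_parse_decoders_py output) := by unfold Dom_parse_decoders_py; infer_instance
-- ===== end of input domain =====

-- B replaces A's line-split + strip + tokenize logic by a single character-level
-- finite-state machine over the raw string (alternative algorithm; same cost).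


-- ===== PORT A =====
def parse_decoders_py (output : String) : List String :=
  ((PySem.Str.split? output "\n").getD []).foldl
    (fun decoders line0 =>
      let line := PySem.Str.strip line0
      if PySem.Str.len line ≠ 0 ∧ PySem.Str.startswith line "V" = true then
        let parts := PySem.Str.split₀ line
        if 2 ≤ parts.length then decoders ++ [parts.getD 1 ""] else decoders
      else decoders) []

-- ===== PORT B =====
-- FSM states: at line start / leading whitespace; inside a first token begun with 'V';
-- in the gap after it; collecting the second token; ignoring the rest of the line.
inductive PvSt | start | tok1 | gap | tok2 | skip
deriving DecidableEq

def pvFlush : PvSt → List Char → List String → List String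
  | PvSt.tok2, buf, res => res ++ [String.ofList buf]
  | _, _, res => res

def pvStep : PvSt × List Char × List String → Char → PvSt × List Char × List String
  | (st, buf, res), c =>
    if c = '\n' then (PvSt.start, [], pvFlush st buf res)
    else match st with
    | PvSt.start =>
        if PySem.Chars.isspace c then (PvSt.start, buf, res)
        else if c = 'V' then (PvSt.tok1, buf, res)
        else (PvSt.skip, buf, res)
    | PvSt.tok1 => if PySem.Chars.isspace c then (PvSt.gap, buf, res) else (PvSt.tok1, buf, res)
    | PvSt.gap => if PySem.Chars.isspace c then (PvSt.gap, buf, res) else (PvSt.tok2, [c], res)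
    | PvSt.tok2 =>
        if PySem.Chars.isspace c then (PvSt.skip, [], res ++ [String.ofList buf])
        else (PvSt.tok2, buf ++ [c], res)
    | PvSt.skip => (PvSt.skip, buf, res)

def parse_decoders_py_alt (output : String) : List String :=
  match output.toList.foldl pvStep (PvSt.start, [], []) with
  | (st, buf, res) => pvFlush st buf res

-- ===== PRECONDITION & SPEC =====
def Spec_parse_decoders_py (output : String) (out : List String) : Prop := out = parse_decoders_py_alt output
instance (output : String) (out : List String) : Decidable (Spec_parse_decoders_py output out) := by unfold Spec_parse_decoders_py; infer_instance

-- ===== CLAIM (what is proved, stated in full; the proofs are below) =====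
def Claim_equal_parse_decoders_py : Prop := ∀ (output : String), Dom_parse_decoders_py output → Spec_parse_decoders_py output (parse_decoders_py output)

-- ===== LEMMAS AND PROOFS =====

-- per-line contribution of A's loop body
def pvA (line0 : String) : List String :=
  let line := PySem.Str.strip line0
  if PySem.Str.len line ≠ 0 ∧ PySem.Str.startswith line "V" = true then
    let parts := PySem.Str.split₀ line
    if 2 ≤ parts.length then [parts.getD 1 ""] else []
  else []

-- per-line contribution, expressed on the character list
def pvContribC (cs : List Char) : List String :=
  let parts := PySem.Chars.split₀ cs
  if 2 ≤ parts.length ∧ PySem.Chars.startswith (parts.getD 0 []) ['V'] = true then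
    [String.ofList (parts.getD 1 [])]
  else []

-- B's filter at Str level (bridging step)
def pvB (parts : List String) : Option String :=
  if 2 ≤ parts.length ∧ PySem.Str.startswith (parts.getD 0 "") "V" = true then
    some (parts.getD 1 "")
  else none

-- str.split() unfolding equation: leading whitespace is skipped
theorem pv_split₀_cons_space (c : Char) (l : List Char) (hc : PySem.Chars.isspace c = true) :
    PySem.Chars.split₀ (c :: l) = PySem.Chars.split₀ l := by
  simp [PySem.Chars.split₀, PySem.Chars.split₀.go, hc]

-- split₀.go relocates its accumulator to the front
theorem pv_go_acc (s cur : List Char) (acc : List (List Char)) :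
    PySem.Chars.split₀.go s cur acc = acc.reverse ++ PySem.Chars.split₀.go s cur [] := by
  induction s generalizing cur acc with
  | nil =>
      simp only [PySem.Chars.split₀.go]
      split <;> simp
  | cons c rest ih =>
      simp only [PySem.Chars.split₀.go]
      split
      · split
        · exact ih _ _
        · rw [ih [] (cur.reverse :: acc), ih [] ([cur.reverse])]
          simp
      · exact ih _ _

-- split₀.go with a nonempty current word emits that word up to the next space
theorem pv_go_word (s cur : List Char) (h : cur ≠ []) :
    PySem.Chars.split₀.go s cur [] =
      (cur.reverse ++ s.takeWhile (fun d => !PySem.Chars.isspace d)) ::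
        PySem.Chars.split₀ (s.dropWhile (fun d => !PySem.Chars.isspace d)) := by
  induction s generalizing cur with
  | nil => simp [PySem.Chars.split₀.go, PySem.Chars.split₀, h]
  | cons c rest ih =>
      by_cases hc : PySem.Chars.isspace c
      · have h1 : PySem.Chars.split₀.go (c :: rest) cur [] =
            PySem.Chars.split₀.go rest [] [cur.reverse] := by
          simp [PySem.Chars.split₀.go, hc, h]
        rw [h1, pv_go_acc]
        have h2 : PySem.Chars.split₀.go rest [] [] = PySem.Chars.split₀ rest := rfl
        simp [h2, List.takeWhile, List.dropWhile, hc, pv_split₀_cons_space c rest hc]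
      · have h1 : PySem.Chars.split₀.go (c :: rest) cur [] =
            PySem.Chars.split₀.go rest (c :: cur) [] := by
          simp [PySem.Chars.split₀.go, hc]
        rw [h1, ih (c :: cur) (by simp)]
        simp [List.takeWhile, List.dropWhile, hc]

-- str.split() unfolding equation: a word head
theorem pv_split₀_cons_word (c : Char) (l : List Char) (hc : ¬ PySem.Chars.isspace c = true) :
    PySem.Chars.split₀ (c :: l) =
      (c :: l.takeWhile (fun d => !PySem.Chars.isspace d)) ::
        PySem.Chars.split₀ (l.dropWhile (fun d => !PySem.Chars.isspace d)) := by
  have h1 : PySem.Chars.split₀ (c :: l) = PySem.Chars.split₀.go l [c] [] := by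
    simp [PySem.Chars.split₀, PySem.Chars.split₀.go, hc]
  rw [h1, pv_go_word l [c] (by simp)]
  simp

-- split₀ ignores leading whitespace
theorem pv_split₀_lstrip (l : List Char) :
    PySem.Chars.split₀ (PySem.Chars.lstrip l) = PySem.Chars.split₀ l := by
  induction l with
  | nil => rfl
  | cons c rest ih =>
      by_cases hc : PySem.Chars.isspace c
      · rw [pv_split₀_cons_space c rest hc, ← ih]
        simp [PySem.Chars.lstrip, List.dropWhile, hc]
      · simp [PySem.Chars.lstrip, List.dropWhile, hc]

-- split₀ of an all-whitespace list is empty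
theorem pv_split₀_spaces (sp : List Char) (hsp : ∀ c ∈ sp, PySem.Chars.isspace c = true) :
    PySem.Chars.split₀ sp = [] := by
  induction sp with
  | nil => rfl
  | cons c rest ih =>
      rw [pv_split₀_cons_space c rest (hsp c (by simp))]
      exact ih (fun d hd => hsp d (by simp [hd]))

-- split₀ ignores dropWhile isspace (lstrip in dropWhile form)
theorem pv_split₀_dropWhile (l : List Char) :
    PySem.Chars.split₀ (l.dropWhile PySem.Chars.isspace) = PySem.Chars.split₀ l :=
  pv_split₀_lstrip l

theorem pv_tw_dw_len (p : Char → Bool) (l : List Char) :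
    (l.takeWhile p).length + (l.dropWhile p).length = l.length := by
  have h := congrArg List.length (List.takeWhile_append_dropWhile (p := p) (l := l))
  rw [List.length_append] at h
  exact h

-- split₀ ignores trailing whitespace
theorem pv_split₀_append_spaces (n : Nat) (l sp : List Char) (hn : l.length ≤ n)
    (hsp : ∀ c ∈ sp, PySem.Chars.isspace c = true) :
    PySem.Chars.split₀ (l ++ sp) = PySem.Chars.split₀ l := by
  induction n generalizing l with
  | zero =>
      have : l = [] := List.eq_nil_of_length_eq_zero (Nat.le_zero.mp hn)
      subst this; simpa using pv_split₀_spaces sp hsp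
  | succ n ih =>
      cases l with
      | nil => simpa using pv_split₀_spaces sp hsp
      | cons c rest =>
          by_cases hc : PySem.Chars.isspace c
          · rw [List.cons_append, pv_split₀_cons_space c _ hc, pv_split₀_cons_space c _ hc]
            exact ih rest (by simp at hn; omega)
          · rw [List.cons_append, pv_split₀_cons_word c _ hc, pv_split₀_cons_word c _ hc]
            rw [List.takeWhile_append, List.dropWhile_append]
            by_cases hall : (rest.dropWhile (fun d => !PySem.Chars.isspace d)).isEmpty
            · have hdw : rest.dropWhile (fun d => !PySem.Chars.isspace d) = [] := by
                simpa [List.isEmpty_iff] using hall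
              have htw : (rest.takeWhile (fun d => !PySem.Chars.isspace d)).length = rest.length := by
                have := pv_tw_dw_len (fun d => !PySem.Chars.isspace d) rest
                rw [hdw] at this; simpa using this
              have htw' : rest.takeWhile (fun d => !PySem.Chars.isspace d) = rest :=
                (List.takeWhile_prefix _).eq_of_length htw
              have hsp0 : sp.takeWhile (fun d => !PySem.Chars.isspace d) = [] := by
                cases sp with
                | nil => rfl
                | cons d ds => simp [List.takeWhile, hsp d (by simp)]
              have hspd : PySem.Chars.split₀ (sp.dropWhile (fun d => !PySem.Chars.isspace d)) = [] :=
                pv_split₀_spaces _ (fun d hd => hsp d ((List.dropWhile_sublist _).mem hd))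
              rw [if_pos htw, if_pos hall, hsp0, htw', hdw, hspd]
              simp [show PySem.Chars.split₀ ([] : List Char) = [] from rfl]
            · have hdw : (rest.dropWhile (fun d => !PySem.Chars.isspace d)) ≠ [] := by
                simpa [List.isEmpty_iff] using hall
              have htw : ¬ (rest.takeWhile (fun d => !PySem.Chars.isspace d)).length = rest.length := by
                have h1 := pv_tw_dw_len (fun d => !PySem.Chars.isspace d) rest
                have h2 : (rest.dropWhile (fun d => !PySem.Chars.isspace d)).length ≠ 0 := by
                  simpa [List.length_eq_zero_iff] using hdw
                omega
              rw [if_neg htw, if_neg hall]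
              congr 1
              refine ih _ ?_
              have := List.length_dropWhile_le (p := fun d => !PySem.Chars.isspace d) (l := rest)
              simp at hn; omega

-- split₀ ignores stripping entirely
theorem pv_split₀_strip (l : List Char) :
    PySem.Chars.split₀ (PySem.Chars.strip l) = PySem.Chars.split₀ l := by
  have hdecomp : PySem.Chars.lstrip l =
      PySem.Chars.rstrip (PySem.Chars.lstrip l) ++
        ((PySem.Chars.lstrip l).reverse.takeWhile PySem.Chars.isspace).reverse := by
    conv_lhs => rw [← List.reverse_reverse (PySem.Chars.lstrip l),
      ← List.takeWhile_append_dropWhile (p := PySem.Chars.isspace)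
        (l := (PySem.Chars.lstrip l).reverse)]
    rw [List.reverse_append]
    simp [PySem.Chars.rstrip]
  have hsp : ∀ c ∈ ((PySem.Chars.lstrip l).reverse.takeWhile PySem.Chars.isspace).reverse,
      PySem.Chars.isspace c = true := by
    intro c hc
    rw [List.mem_reverse] at hc
    exact List.mem_takeWhile_imp hc
  calc PySem.Chars.split₀ (PySem.Chars.strip l)
      = PySem.Chars.split₀ (PySem.Chars.lstrip l) := by
        show PySem.Chars.split₀ (PySem.Chars.rstrip (PySem.Chars.lstrip l)) = _
        conv_rhs => rw [hdecomp]
        exact (pv_split₀_append_spaces (PySem.Chars.rstrip (PySem.Chars.lstrip l)).length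
          _ _ le_rfl hsp).symm
    _ = PySem.Chars.split₀ l := pv_split₀_lstrip l

-- the stripped line is nonempty and starts with 'V' iff the first token starts with 'V'
theorem pv_cond (l : List Char) :
    (PySem.Chars.strip l ≠ [] ∧ PySem.Chars.startswith (PySem.Chars.strip l) ['V'] = true) ↔
      (PySem.Chars.split₀ l ≠ [] ∧
        PySem.Chars.startswith ((PySem.Chars.split₀ l).getD 0 []) ['V'] = true) := by
  rcases h : PySem.Chars.lstrip l with _ | ⟨c, t⟩
  · have h1 : PySem.Chars.strip l = [] := by
      show PySem.Chars.rstrip (PySem.Chars.lstrip l) = []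
      rw [h]; rfl
    have h2 : PySem.Chars.split₀ l = [] := by
      rw [← pv_split₀_lstrip, h]; rfl
    simp [h1, h2]
  · have hc : ¬ PySem.Chars.isspace c = true := by
      have hd := List.head?_dropWhile_not PySem.Chars.isspace l
      rw [show List.dropWhile PySem.Chars.isspace l = c :: t from h] at hd
      simp only [List.head?_cons] at hd
      simp [hd]
    have hsplit : PySem.Chars.split₀ l =
        (c :: t.takeWhile (fun d => !PySem.Chars.isspace d)) ::
          PySem.Chars.split₀ (t.dropWhile (fun d => !PySem.Chars.isspace d)) := by
      rw [← pv_split₀_lstrip, h, pv_split₀_cons_word c t hc]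
    have hstrip : ∃ r, PySem.Chars.strip l = c :: r := by
      show ∃ r, PySem.Chars.rstrip (PySem.Chars.lstrip l) = c :: r
      rw [h]
      simp only [PySem.Chars.rstrip, List.reverse_cons]
      rw [List.dropWhile_append]
      by_cases he : (t.reverse.dropWhile PySem.Chars.isspace).isEmpty
      · exact ⟨[], by rw [if_pos he]; simp [List.dropWhile, hc]⟩
      · exact ⟨(t.reverse.dropWhile PySem.Chars.isspace).reverse, by rw [if_neg he]; simp⟩
    obtain ⟨r, hr⟩ := hstrip
    rw [hr, hsplit]
    simp [PySem.Chars.startswith, List.isPrefixOf]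

-- String.toList distributes over split₀∘strip: stripping does not change str.split()
theorem pv_str_split₀_strip (line : String) :
    PySem.Str.split₀ (PySem.Str.strip line) = PySem.Str.split₀ line := by
  apply List.map_injective_iff.mpr (fun a b hab => String.toList_inj.mp hab)
  rw [PySem.Str.split₀_map_toList, PySem.Str.split₀_map_toList, PySem.Str.toList_strip]
  exact pv_split₀_strip line.toList

-- per-line agreement of A's body contribution with B's filter
theorem pv_line (line : String) : pvA line = (pvB (PySem.Str.split₀ line)).toList := by
  simp only [pvA, pvB]
  rw [pv_str_split₀_strip]
  have hlenmap := congrArg List.length (PySem.Str.split₀_map_toList line)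
  simp only [List.length_map] at hlenmap
  have hgd0 : (((PySem.Str.split₀ line).getD 0 "")).toList =
      (PySem.Chars.split₀ line.toList).getD 0 [] := by
    have := List.getD_map (PySem.Str.split₀ line) "" (n := 0) String.toList
    rw [PySem.Str.split₀_map_toList] at this
    simpa using this.symm
  have hcond := pv_cond line.toList
  by_cases h2 : 2 ≤ (PySem.Str.split₀ line).length
  · have hne : PySem.Chars.split₀ line.toList ≠ [] := by
      intro hnil
      have h0 : (PySem.Str.split₀ line).length = 0 := by rw [hlenmap, hnil]; rfl
      omega
    have hcondA : (PySem.Str.len (PySem.Str.strip line) ≠ 0 ∧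
        PySem.Str.startswith (PySem.Str.strip line) "V" = true) ↔
        PySem.Chars.startswith ((PySem.Chars.split₀ line.toList).getD 0 []) ['V'] = true := by
      rw [PySem.Str.len_eq, PySem.Str.startswith_eq, PySem.Str.toList_strip]
      constructor
      · intro ⟨ha, hb⟩
        exact ((hcond.mp ⟨by intro hnil; simp [hnil] at ha, by simpa using hb⟩)).2
      · intro hb
        obtain ⟨ha', hb'⟩ := hcond.mpr ⟨hne, hb⟩
        exact ⟨by simpa using ha', by simpa using hb'⟩
    have hcondB : PySem.Str.startswith ((PySem.Str.split₀ line).getD 0 "") "V" = true ↔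
        PySem.Chars.startswith ((PySem.Chars.split₀ line.toList).getD 0 []) ['V'] = true := by
      rw [PySem.Str.startswith_eq, hgd0]
      show PySem.Chars.startswith _ ("V".toList) = true ↔ PySem.Chars.startswith _ ['V'] = true
      rfl
    by_cases hv : PySem.Chars.startswith ((PySem.Chars.split₀ line.toList).getD 0 []) ['V'] = true
    · rw [if_pos (hcondA.mpr hv), if_pos h2, if_pos ⟨h2, hcondB.mpr hv⟩]
      rfl
    · rw [if_neg (fun hca => hv (hcondA.mp hca)),
          if_neg (fun hcb => hv (hcondB.mp hcb.2))]
      rfl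
  · have hBnone : (if 2 ≤ (PySem.Str.split₀ line).length ∧
        PySem.Str.startswith ((PySem.Str.split₀ line).getD 0 "") "V" = true then
          some ((PySem.Str.split₀ line).getD 1 "") else none) = none :=
      if_neg (fun hcb => h2 hcb.1)
    rw [hBnone,
      show (if 2 ≤ (PySem.Str.split₀ line).length
          then [(PySem.Str.split₀ line).getD 1 ""] else ([] : List String)) = []
        from if_neg h2]
    split <;> rfl

-- A's loop body contribution equals pvContribC on the characters
theorem pv_line_chars (line : String) : pvA line = pvContribC line.toList := by
  rw [pv_line]
  simp only [pvB, pvContribC]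
  have hlenmap := congrArg List.length (PySem.Str.split₀_map_toList line)
  simp only [List.length_map] at hlenmap
  have hgd0 : (((PySem.Str.split₀ line).getD 0 "")).toList =
      (PySem.Chars.split₀ line.toList).getD 0 [] := by
    have := List.getD_map (PySem.Str.split₀ line) "" (n := 0) String.toList
    rw [PySem.Str.split₀_map_toList] at this
    simpa using this.symm
  have hgd1 : (((PySem.Str.split₀ line).getD 1 "")).toList =
      (PySem.Chars.split₀ line.toList).getD 1 [] := by
    have := List.getD_map (PySem.Str.split₀ line) "" (n := 1) String.toList
    rw [PySem.Str.split₀_map_toList] at this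
    simpa using this.symm
  have hsw : PySem.Str.startswith ((PySem.Str.split₀ line).getD 0 "") "V" = true ↔
      PySem.Chars.startswith ((PySem.Chars.split₀ line.toList).getD 0 []) ['V'] = true := by
    rw [PySem.Str.startswith_eq, hgd0]
    show PySem.Chars.startswith _ ("V".toList) = true ↔ PySem.Chars.startswith _ ['V'] = true
    rfl
  by_cases hc : 2 ≤ (PySem.Chars.split₀ line.toList).length ∧
      PySem.Chars.startswith ((PySem.Chars.split₀ line.toList).getD 0 []) ['V'] = true
  · rw [if_pos ⟨by omega, hsw.mpr hc.2⟩, if_pos hc]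
    have hv : (PySem.Str.split₀ line).getD 1 "" =
        String.ofList ((PySem.Chars.split₀ line.toList).getD 1 []) := by
      apply String.toList_inj.mp
      rw [hgd1]
      simp
    rw [hv]
    rfl
  · rw [if_neg (fun hsc => hc ⟨by omega, hsw.mp hsc.2⟩), if_neg hc]
    rfl

-- ----- FSM lemmas (B side) -----

def pvFlush3 (s : PvSt × List Char × List String) : List String := pvFlush s.1 s.2.1 s.2.2

theorem pv_step_nl (s : PvSt × List Char × List String) :
    pvStep s '\n' = (PvSt.start, [], pvFlush3 s) := by
  rcases s with ⟨st, buf, res⟩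
  simp [pvStep, pvFlush3]

theorem pv_ns_ne_nl (c : Char) (h : PySem.Chars.isspace c = false) : c ≠ '\n' := by
  intro he; subst he; exact absurd h (by decide)

theorem pv_foldl_fix {α β : Type} (f : α → β → α) (a : α) (l : List β)
    (h : ∀ c ∈ l, f a c = a) : l.foldl f a = a := by
  induction l with
  | nil => rfl
  | cons c rest ih =>
      rw [List.foldl_cons, h c (by simp)]
      exact ih (fun d hd => h d (by simp [hd]))

theorem pv_foldl_tok2 (l : List Char) (buf : List Char) (res : List String)
    (h : ∀ c ∈ l, PySem.Chars.isspace c = false) :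
    l.foldl pvStep (PvSt.tok2, buf, res) = (PvSt.tok2, buf ++ l, res) := by
  induction l generalizing buf with
  | nil => simp
  | cons c rest ih =>
      have hc := h c (by simp)
      rw [List.foldl_cons]
      have hstep : pvStep (PvSt.tok2, buf, res) c = (PvSt.tok2, buf ++ [c], res) := by
        simp [pvStep, hc, pv_ns_ne_nl c hc]
      rw [hstep, ih (buf ++ [c]) (fun d hd => h d (by simp [hd]))]
      simp

-- membership transport helpers
theorem pv_mem_takeWhile {p : Char → Bool} {l : List Char} {x : Char} (h : x ∈ l.takeWhile p) : x ∈ l :=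
  (List.takeWhile_sublist p).mem h

theorem pv_mem_dropWhile {p : Char → Bool} {l : List Char} {x : Char} (h : x ∈ l.dropWhile p) : x ∈ l :=
  (List.dropWhile_sublist p).mem h

-- the per-line run of the FSM from the line-start state
theorem pv_run_line (cs : List Char) (h : ∀ c ∈ cs, c ≠ '\n') (r : List String) :
    pvFlush3 (cs.foldl pvStep (PvSt.start, [], r)) = r ++ pvContribC cs := by
  conv_lhs => rw [← List.takeWhile_append_dropWhile (p := PySem.Chars.isspace) (l := cs)]
  rw [List.foldl_append]
  have h1 : (cs.takeWhile PySem.Chars.isspace).foldl pvStep (PvSt.start, [], r) = (PvSt.start, [], r) := by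
    refine pv_foldl_fix _ _ _ (fun c hc => ?_)
    have hsp : PySem.Chars.isspace c = true := List.mem_takeWhile_imp hc
    have hne : c ≠ '\n' := h c (pv_mem_takeWhile hc)
    simp [pvStep, hsp, hne]
  rw [h1]
  cases hd : cs.dropWhile PySem.Chars.isspace with
  | nil =>
      have hnil : PySem.Chars.split₀ cs = [] := by
        rw [← pv_split₀_dropWhile, hd]; rfl
      simp [pvContribC, hnil, pvFlush3, pvFlush]
  | cons c t =>
      have hcs : PySem.Chars.isspace c = false := by
        have hh := List.head?_dropWhile_not PySem.Chars.isspace cs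
        rw [hd] at hh
        simp only [List.head?_cons] at hh
        simpa using hh
      have hmemcs : ∀ x ∈ c :: t, x ∈ cs := by
        intro x hx; rw [← hd] at hx; exact pv_mem_dropWhile hx
      have hct : ∀ x ∈ c :: t, x ≠ '\n' := fun x hx => h x (hmemcs x hx)
      have hcne : c ≠ '\n' := hct c (by simp)
      have ht : ∀ x ∈ t, x ≠ '\n' := fun x hx => hct x (by simp [hx])
      have hsplit : PySem.Chars.split₀ cs =
          (c :: t.takeWhile (fun d => !PySem.Chars.isspace d)) ::
            PySem.Chars.split₀ (t.dropWhile (fun d => !PySem.Chars.isspace d)) := by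
        rw [← pv_split₀_dropWhile, hd, pv_split₀_cons_word c t (by simp [hcs])]
      by_cases hV : c = 'V'
      · -- first token starts with 'V'
        rw [List.foldl_cons,
          show pvStep (PvSt.start, [], r) c = (PvSt.tok1, [], r) by simp [pvStep, hV, show PySem.Chars.isspace 'V' = false from by decide]]
        conv_lhs => rw [← List.takeWhile_append_dropWhile (p := fun d => !PySem.Chars.isspace d) (l := t)]
        rw [List.foldl_append]
        have h2 : (t.takeWhile (fun d => !PySem.Chars.isspace d)).foldl pvStep (PvSt.tok1, [], r) = (PvSt.tok1, [], r) := by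
          refine pv_foldl_fix _ _ _ (fun x hx => ?_)
          have hns : PySem.Chars.isspace x = false := by
            have := List.mem_takeWhile_imp hx; simpa using this
          simp [pvStep, hns, pv_ns_ne_nl x hns]
        rw [h2]
        cases hd2 : t.dropWhile (fun d => !PySem.Chars.isspace d) with
        | nil =>
            have : PySem.Chars.split₀ cs = [c :: t.takeWhile (fun d => !PySem.Chars.isspace d)] := by
              rw [hsplit, hd2]; rfl
            simp [pvContribC, this, pvFlush3, pvFlush]
        | cons d u =>
            have hSd : PySem.Chars.isspace d = true := by
              have hh := List.head?_dropWhile_not (fun x => !PySem.Chars.isspace x) t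
              rw [hd2] at hh
              simp only [List.head?_cons] at hh
              simpa using hh
            have hmemdu : ∀ x ∈ d :: u, x ∈ t := by
              intro x hx; rw [← hd2] at hx; exact pv_mem_dropWhile hx
            have hdne : d ≠ '\n' := ht d (hmemdu d (by simp))
            have hu : ∀ x ∈ u, x ≠ '\n' := fun x hx => ht x (hmemdu x (by simp [hx]))
            rw [List.foldl_cons,
              show pvStep (PvSt.tok1, [], r) d = (PvSt.gap, [], r) by simp [pvStep, hSd, hdne]]
            conv_lhs => rw [← List.takeWhile_append_dropWhile (p := PySem.Chars.isspace) (l := u)]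
            rw [List.foldl_append]
            have h3 : (u.takeWhile PySem.Chars.isspace).foldl pvStep (PvSt.gap, [], r) = (PvSt.gap, [], r) := by
              refine pv_foldl_fix _ _ _ (fun x hx => ?_)
              have hsp : PySem.Chars.isspace x = true := List.mem_takeWhile_imp hx
              have hne : x ≠ '\n' := hu x (pv_mem_takeWhile hx)
              simp [pvStep, hsp, hne]
            rw [h3]
            have hsplit2 : PySem.Chars.split₀ (t.dropWhile (fun d => !PySem.Chars.isspace d)) =
                PySem.Chars.split₀ (u.dropWhile PySem.Chars.isspace) := by
              rw [hd2, pv_split₀_cons_space d u hSd, ← pv_split₀_dropWhile]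
            cases hd3 : u.dropWhile PySem.Chars.isspace with
            | nil =>
                have : PySem.Chars.split₀ cs = [c :: t.takeWhile (fun d => !PySem.Chars.isspace d)] := by
                  rw [hsplit, hsplit2, hd3]; rfl
                simp [pvContribC, this, pvFlush3, pvFlush]
            | cons e v =>
                have hSe : PySem.Chars.isspace e = false := by
                  have hh := List.head?_dropWhile_not PySem.Chars.isspace u
                  rw [hd3] at hh
                  simp only [List.head?_cons] at hh
                  simpa using hh
                have hmemev : ∀ x ∈ e :: v, x ∈ u := by
                  intro x hx; rw [← hd3] at hx; exact pv_mem_dropWhile hx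
                have hv : ∀ x ∈ v, x ≠ '\n' := fun x hx => hu x (hmemev x (by simp [hx]))
                rw [List.foldl_cons,
                  show pvStep (PvSt.gap, [], r) e = (PvSt.tok2, [e], r) by
                    simp [pvStep, hSe, pv_ns_ne_nl e hSe]]
                conv_lhs => rw [← List.takeWhile_append_dropWhile (p := fun d => !PySem.Chars.isspace d) (l := v)]
                rw [List.foldl_append]
                rw [pv_foldl_tok2 _ _ _ (fun x hx => by
                  have := List.mem_takeWhile_imp hx; simpa using this)]
                have hsplit3 : PySem.Chars.split₀ (u.dropWhile PySem.Chars.isspace) =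
                    (e :: v.takeWhile (fun d => !PySem.Chars.isspace d)) ::
                      PySem.Chars.split₀ (v.dropWhile (fun d => !PySem.Chars.isspace d)) := by
                  rw [hd3, pv_split₀_cons_word e v (by simp [hSe])]
                have hparts : PySem.Chars.split₀ cs =
                    (c :: t.takeWhile (fun d => !PySem.Chars.isspace d)) ::
                      (e :: v.takeWhile (fun d => !PySem.Chars.isspace d)) ::
                        PySem.Chars.split₀ (v.dropWhile (fun d => !PySem.Chars.isspace d)) := by
                  rw [hsplit, hsplit2, hsplit3]
                have hcontrib : pvContribC cs =
                    [String.ofList (e :: v.takeWhile (fun d => !PySem.Chars.isspace d))] := by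
                  simp [pvContribC, hparts, hV, PySem.Chars.startswith, List.isPrefixOf]
                cases hd4 : v.dropWhile (fun d => !PySem.Chars.isspace d) with
                | nil =>
                    simp [pvFlush3, pvFlush, hcontrib]
                | cons f w =>
                    have hSf : PySem.Chars.isspace f = true := by
                      have hh := List.head?_dropWhile_not (fun x => !PySem.Chars.isspace x) v
                      rw [hd4] at hh
                      simp only [List.head?_cons] at hh
                      simpa using hh
                    have hmemfw : ∀ x ∈ f :: w, x ∈ v := by
                      intro x hx; rw [← hd4] at hx; exact pv_mem_dropWhile hx
                    have hfne : f ≠ '\n' := hv f (hmemfw f (by simp))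
                    have hw : ∀ x ∈ w, x ≠ '\n' := fun x hx => hv x (hmemfw x (by simp [hx]))
                    rw [List.foldl_cons,
                      show pvStep (PvSt.tok2, [e] ++ v.takeWhile (fun d => !PySem.Chars.isspace d), r) f =
                          (PvSt.skip, [], r ++ [String.ofList ([e] ++ v.takeWhile (fun d => !PySem.Chars.isspace d))]) by
                        simp [pvStep, hSf, hfne]]
                    rw [pv_foldl_fix _ _ _ (fun x hx => by simp [pvStep, hw x hx])]
                    simp [pvFlush3, pvFlush, hcontrib]
      · -- first token does not start with 'V'
        rw [List.foldl_cons,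
          show pvStep (PvSt.start, [], r) c = (PvSt.skip, [], r) by simp [pvStep, hcs, hcne, hV]]
        rw [pv_foldl_fix _ _ _ (fun x hx => by simp [pvStep, ht x hx])]
        have hsw : PySem.Chars.startswith
            ((PySem.Chars.split₀ cs).getD 0 []) ['V'] = false := by
          rw [hsplit]
          simp [PySem.Chars.startswith, List.isPrefixOf]
          exact fun e => hV e.symm
        simp [pvContribC, pvFlush3, pvFlush]
        intro _
        simpa [List.getD] using hsw

-- the reference line decomposition (split on '\n')
def pvLines (cs : List Char) : List (List Char) :=
  match h : cs.dropWhile (fun c => c != '\n') with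
  | [] => [cs.takeWhile (fun c => c != '\n')]
  | _ :: rest => cs.takeWhile (fun c => c != '\n') :: pvLines rest
termination_by cs.length
decreasing_by
  have h2 := List.length_dropWhile_le (p := fun c : Char => c != '\n') (l := cs)
  rw [h] at h2
  simp at h2
  omega

theorem pvLines_nil : pvLines [] = [[]] := by
  rw [pvLines]
  split
  · rfl
  · simp_all

theorem pvLines_cons_nl (rest : List Char) : pvLines ('\n' :: rest) = [] :: pvLines rest := by
  rw [pvLines]
  split
  · simp_all
  · rename_i heq
    simp only [List.dropWhile_cons] at heq
    simp only [show (('\n' : Char) != '\n') = false from by decide, if_neg Bool.false_ne_true] at heq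
    cases heq
    simp

theorem pv_mh_mh {α : Type} (f g : α → α) (l : List α) :
    List.modifyHead f (List.modifyHead g l) = List.modifyHead (fun x => f (g x)) l := by
  cases l <;> simp

theorem pvLines_cons_ne (c : Char) (rest : List Char) (h : c ≠ '\n') :
    pvLines (c :: rest) = List.modifyHead (fun x => c :: x) (pvLines rest) := by
  have hne : ((c != '\n') = true) := by simp [h]
  rw [pvLines, pvLines]
  cases hdw : rest.dropWhile (fun c => c != '\n') with
  | nil =>
      split
      · simp [hne]
      · rename_i heq
        simp only [List.dropWhile_cons, hne, if_pos] at heq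
        rw [hdw] at heq; cases heq
  | cons d u =>
      split
      · rename_i heq
        simp only [List.dropWhile_cons, hne, if_pos] at heq
        rw [hdw] at heq; cases heq
      · rename_i heq
        simp only [List.dropWhile_cons, hne, if_pos] at heq
        rw [hdw] at heq; cases heq
        simp [hne]

theorem pv_go_spec (fuel : Nat) (l cur : List Char) (acc : List (List Char)) (h : l.length < fuel) :
    PySem.Chars.splitOn.go ['\n'] fuel l cur acc =
      acc.reverse ++ List.modifyHead (fun x => cur.reverse ++ x) (pvLines l) := by
  induction fuel generalizing l cur acc with
  | zero => omega
  | succ fuel ih =>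
      cases l with
      | nil => simp [PySem.Chars.splitOn.go, pvLines_nil]
      | cons c rest =>
          by_cases hc : c = '\n'
          · subst hc
            have hpre : ['\n'].isPrefixOf ('\n' :: rest) = true := by simp [List.isPrefixOf]
            simp only [PySem.Chars.splitOn.go, hpre, if_pos]
            rw [show List.drop ['\n'].length ('\n' :: rest) = rest from rfl]
            rw [ih rest [] (cur.reverse :: acc) (by simp at h; omega)]
            simp only [pvLines_cons_nl]
            cases pvLines rest <;> simp
          · have hpre : ['\n'].isPrefixOf (c :: rest) = false := by
              simp [List.isPrefixOf]; exact fun e => hc e.symm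
            simp only [PySem.Chars.splitOn.go, hpre]
            rw [ih rest (c :: cur) acc (by simp at h; omega)]
            rw [pvLines_cons_ne c rest hc, pv_mh_mh]
            simp

theorem pv_splitOn_eq_pvLines (cs : List Char) :
    PySem.Chars.splitOn cs ['\n'] = pvLines cs := by
  rw [PySem.Chars.splitOn, pv_go_spec _ _ _ _ (by omega)]
  cases h : pvLines cs <;> simp


theorem pv_run (cs : List Char) :
    ∀ r : List String,
      pvFlush3 (cs.foldl pvStep (PvSt.start, [], r)) = r ++ (pvLines cs).flatMap pvContribC := by
  induction cs using pvLines.induct with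
  | case1 cs hdw =>
      intro r
      have hcs : cs.takeWhile (fun c => c != '\n') = cs := by
        conv_rhs => rw [← List.takeWhile_append_dropWhile (p := fun c : Char => c != '\n') (l := cs), hdw]
        simp
      have hlines : pvLines cs = [cs] := by
        rw [pvLines]
        split
        · rw [hcs]
        · rename_i heq; rw [hdw] at heq; cases heq
      have hne : ∀ c ∈ cs, c ≠ '\n' := by
        intro c hc
        rw [← hcs] at hc
        have := List.mem_takeWhile_imp hc
        simpa using this
      rw [pv_run_line cs hne r, hlines]
      simp
  | case2 cs hd rest hdw ih =>
      intro r
      have hhd : hd = '\n' := by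
        have hh := List.head?_dropWhile_not (fun c : Char => c != '\n') cs
        rw [hdw] at hh
        simp only [List.head?_cons] at hh
        simpa using hh
      have hline : ∀ c ∈ cs.takeWhile (fun c : Char => c != '\n'), c ≠ '\n' := by
        intro c hc
        have := List.mem_takeWhile_imp hc
        simpa using this
      have hlines : pvLines cs = cs.takeWhile (fun c => c != '\n') :: pvLines rest := by
        rw [pvLines]
        split
        · rename_i heq; rw [hdw] at heq; cases heq
        · rename_i heq; rw [hdw] at heq; cases heq; rfl
      conv_lhs => rw [← List.takeWhile_append_dropWhile (p := fun c : Char => c != '\n') (l := cs), hdw, hhd]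
      rw [List.foldl_append, List.foldl_cons, pv_step_nl,
        show pvFlush3 (List.foldl pvStep (PvSt.start, [], r) (cs.takeWhile (fun c : Char => c != '\n'))) =
            r ++ pvContribC (cs.takeWhile (fun c : Char => c != '\n')) from
          pv_run_line _ hline r,
        ih (r ++ pvContribC (cs.takeWhile (fun c : Char => c != '\n'))), hlines]
      simp

-- ===== VERDICT (by name: the statement is the Claim_ definition above) =====
theorem parse_decoders_py_spec : Claim_equal_parse_decoders_py := by
  intro output _
  unfold Spec_parse_decoders_py parse_decoders_py parse_decoders_py_alt
  have hbody : (fun (decoders : List String) (line0 : String) =>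
      let line := PySem.Str.strip line0
      if PySem.Str.len line ≠ 0 ∧ PySem.Str.startswith line "V" = true then
        let parts := PySem.Str.split₀ line
        if 2 ≤ parts.length then decoders ++ [parts.getD 1 ""] else decoders
      else decoders) =
      fun decoders line0 => decoders ++ pvA line0 := by
    funext acc line0
    simp only [pvA]
    split_ifs <;> simp
  rw [hbody, PySem.List.foldl_append_eq_flatMap]
  have hB : (match output.toList.foldl pvStep (PvSt.start, [], []) with
      | (st, buf, res) => pvFlush st buf res) =
      pvFlush3 (output.toList.foldl pvStep (PvSt.start, ([], []))) := rfl
  rw [hB, pv_run output.toList []]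
  have hlines : (PySem.Str.split? output "\n").getD [] =
      (pvLines output.toList).map String.ofList := by
    rw [PySem.Str.split?,
      show ("\n".toList) = ['\n'] from rfl]
    simp [PySem.Chars.split?, pv_splitOn_eq_pvLines]
  rw [hlines]
  have hfun : (fun cs => pvA (String.ofList cs)) = pvContribC := by
    funext cs
    rw [pv_line_chars]
    simp
  rw [List.flatMap_map, hfun]
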